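-- pv_equiv track=rewrite | github.com/benwiki/bencode | archive/0Prog/Python/dragon.py | dragon
-- ===== SOURCE A (Python) =====
-- def dragon(level, maxdir=4):
-- 	product=[0 for i in range(2**level)]
-- 	for lvl in range(level):
-- 		for i in range(2**lvl):
-- 			j = 2**(lvl+1)-1 - i
-- 			if product[i] >= maxdir-1:
-- 				product[j] = 0
-- 			else:
-- 				product[j] = product[i] + 1
-- 	return product
-- ===== SOURCE B (Python) =====
-- def dragon(level, maxdir=4):
--     # Closed form: the n-th direction is popcount(gray(n)) mod maxdir
--     # (gray(n) = n ^ (n >> 1)); computed independently per index, no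
--     # doubling/mirroring construction.
--     m = maxdir if maxdir > 1 else 1
--     return [bin(n ^ (n >> 1)).count("1") % m for n in range(2 ** level)]
-- ===== Notes on version B (the rewrite author's own statement) =====
-- stated objective: alternative
-- what changed: B computes each direction independently by the closed form popcount(n XOR (n>>1)) mod maxdir over all indices, instead of A's level-by-level construction that fills a preallocated 2^level array via mirrored index arithmetic.
import Mathlib
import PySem

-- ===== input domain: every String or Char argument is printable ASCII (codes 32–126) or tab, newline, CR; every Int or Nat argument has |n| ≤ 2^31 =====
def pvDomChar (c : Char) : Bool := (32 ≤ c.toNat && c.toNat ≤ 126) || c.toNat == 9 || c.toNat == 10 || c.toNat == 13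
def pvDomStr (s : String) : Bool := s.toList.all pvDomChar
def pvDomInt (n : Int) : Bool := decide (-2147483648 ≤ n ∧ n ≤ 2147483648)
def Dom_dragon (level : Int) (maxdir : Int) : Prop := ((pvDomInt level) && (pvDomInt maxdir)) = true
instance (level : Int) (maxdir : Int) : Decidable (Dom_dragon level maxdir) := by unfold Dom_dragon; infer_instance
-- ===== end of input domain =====

-- B replaces A's level-by-level fill of a preallocated 2^level array (mirrored index
-- arithmetic) by a per-index closed form: the n-th direction is popcount(n XOR n>>1) mod maxdir.

-- ===== PORT A =====
-- product[i] is read with i < 2^lvl ≤ len(product), always in range, so List.getD is exact here.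
def dragon (level : Int) (maxdir : Int) : List Int :=
  let product := List.replicate (2 ^ level.toNat) (0 : Int)
  (List.range level.toNat).foldl (fun product lvl =>
    (List.range (2 ^ lvl)).foldl (fun product i =>
      let j := 2 ^ (lvl + 1) - 1 - i
      let v := product.getD i 0
      if v ≥ maxdir - 1 then product.set j 0 else product.set j (v + 1))
      product)
    product

-- ===== PORT B =====
-- hand port of Python's bin(x).count("1"): exact, peels one bit per step
def popCount (n : Nat) : Nat :=
  if h : n = 0 then 0 else popCount (n / 2) + n % 2
decreasing_by exact Nat.div_lt_self (Nat.pos_of_ne_zero h) one_lt_two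

def dragon_alt (level : Int) (maxdir : Int) : List Int :=
  let m : Int := if maxdir > 1 then maxdir else 1
  (List.range (2 ^ level.toNat)).map (fun n =>
    PySem.Int.mod ((popCount (n ^^^ (n >>> 1)) : Nat) : Int) m)

-- ===== PRECONDITION & SPEC =====
-- Pre_ excludes level < 0, where Python A raises TypeError (range(2**level) on a float).
def Pre_dragon (level : Int) (maxdir : Int) : Prop := 0 ≤ level
instance (level : Int) (maxdir : Int) : Decidable (Pre_dragon level maxdir) := by unfold Pre_dragon; infer_instance
def pvWitness_dragon : Int × Int := (3, 4)

def Spec_dragon (level : Int) (maxdir : Int) (out : List Int) : Prop := out = dragon_alt level maxdir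
instance (level : Int) (maxdir : Int) (out : List Int) : Decidable (Spec_dragon level maxdir out) := by unfold Spec_dragon; infer_instance

-- ===== CLAIM (what is proved, stated in full; the proofs are below) =====
def Claim_equal_dragon : Prop := ∀ (level : Int) (maxdir : Int), Dom_dragon level maxdir → Pre_dragon level maxdir → Spec_dragon level maxdir (dragon level maxdir)

-- ===== LEMMAS AND PROOFS =====

-- A's inner loop: with the first m entries q already final and at least m slots after
-- them, the loop over i < t writes the advanced value of q[i] at position 2m-1-i,
-- filling the top of the 2m-block back-to-front.
lemma dragon_inner (maxdir : Int) (q r : List Int) (m t : Nat)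
    (hq : q.length = m) (ht : t ≤ m) (hr : m ≤ r.length) :
    (List.range t).foldl (fun p i =>
        let j := m * 2 - 1 - i
        let v := p.getD i 0
        if v ≥ maxdir - 1 then p.set j 0 else p.set j (v + 1)) (q ++ r)
    = q ++ (r.take (m - t) ++
        (((q.take t).map (fun x => if x ≥ maxdir - 1 then 0 else x + 1)).reverse ++ r.drop m)) := by
  induction t with
  | zero =>
      simp [List.take_append_drop]
  | succ t ih =>
      have ht' : t ≤ m := Nat.le_of_succ_le ht
      have htm : t < m := ht
      have htq : t < q.length := by omega
      have hrl : m - t - 1 < r.length := by omega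
      rw [List.range_succ, List.foldl_append, ih ht']
      simp only [List.foldl_cons, List.foldl_nil]
      rw [List.getD_append _ _ _ _ htq]
      rw [← apply_ite (List.set (q ++ (r.take (m - t) ++
        (((q.take t).map (fun x => if x ≥ maxdir - 1 then 0 else x + 1)).reverse ++ r.drop m)))
        (m * 2 - 1 - t))]
      rw [show m - t = (m - t - 1) + 1 by omega, List.take_add_one,
          List.getElem?_eq_getElem hrl]
      have hassoc : q ++ ((r.take (m - t - 1) ++ (some r[m - t - 1]).toList) ++
            (((q.take t).map (fun x => if x ≥ maxdir - 1 then 0 else x + 1)).reverse ++ r.drop m))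
          = (q ++ r.take (m - t - 1)) ++ (r[m - t - 1] ::
            (((q.take t).map (fun x => if x ≥ maxdir - 1 then 0 else x + 1)).reverse ++ r.drop m)) := by
        simp only [Option.toList_some, List.append_assoc, List.cons_append, List.nil_append]
      rw [hassoc]
      have hlen : (q ++ r.take (m - t - 1)).length = m * 2 - 1 - t := by
        rw [List.length_append, List.length_take, hq,
          Nat.min_eq_left (by omega : m - t - 1 ≤ r.length)]
        omega
      rw [List.set_append_right _ _ hlen.le]
      rw [show m * 2 - 1 - t - (q ++ r.take (m - t - 1)).length = 0 by rw [hlen]; omega]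
      rw [List.set_cons_zero]
      rw [List.getD_eq_getElem _ _ htq]
      simp [show m - (t + 1) = m - t - 1 by omega]
      rw [show List.take (t + 1) (List.map (fun x => if maxdir ≤ x + 1 then (0:Int) else x + 1) q)
            = List.take t (List.map (fun x => if maxdir ≤ x + 1 then (0:Int) else x + 1) q)
              ++ [(List.map (fun x => if maxdir ≤ x + 1 then (0:Int) else x + 1) q)[t]'(by simpa using htq)]
          from by rw [List.take_add_one, List.getElem?_eq_getElem (by simpa using htq)]; rfl]
      simp [List.reverse_append]

-- length of the mirror-built list after k doublings
lemma mirror_len (maxdir : Int) (k : Nat) :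
    ((List.range k).foldl (fun product _ =>
      product ++ product.reverse.map (fun x => if x ≥ maxdir - 1 then 0 else x + 1))
      ([0] : List Int)).length = 2 ^ k := by
  induction k with
  | zero => simp
  | succ k ih =>
      rw [List.range_succ, List.foldl_append]
      simp only [List.foldl_cons, List.foldl_nil, List.length_append, List.length_map,
        List.length_reverse, ih, pow_succ]
      omega

-- main invariant: after k outer iterations A's array is the mirror build padded with zeros
lemma dragon_invariant (maxdir : Int) (L k : Nat) (hk : k ≤ L) :
    (List.range k).foldl (fun product lvl =>
      (List.range (2 ^ lvl)).foldl (fun product i =>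
        let j := 2 ^ (lvl + 1) - 1 - i
        let v := product.getD i 0
        if v ≥ maxdir - 1 then product.set j 0 else product.set j (v + 1))
        product) (List.replicate (2 ^ L) (0 : Int))
    = ((List.range k).foldl (fun product _ =>
        product ++ product.reverse.map (fun x => if x ≥ maxdir - 1 then 0 else x + 1))
        ([0] : List Int)) ++ List.replicate (2 ^ L - 2 ^ k) (0 : Int) := by
  induction k with
  | zero =>
      have h1 : (1:Nat) ≤ 2 ^ L := Nat.one_le_two_pow
      simp only [List.range_zero, List.foldl_nil, pow_zero]
      rw [show (2:Nat) ^ L = 1 + (2 ^ L - 1) by omega, List.replicate_add]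
      simp
  | succ k ih =>
      have hk' : k ≤ L := Nat.le_of_succ_le hk
      have hpow : (2:Nat) ^ k * 2 ≤ 2 ^ L := by rw [← pow_succ]; exact Nat.pow_le_pow_right (by norm_num) hk
      have hpows : (2:Nat) ^ (k + 1) = 2 ^ k * 2 := by rw [pow_succ]
      rw [List.range_succ, List.foldl_append, List.foldl_append, ih hk']
      simp only [List.foldl_cons, List.foldl_nil, hpows]
      rw [dragon_inner maxdir _ _ (2 ^ k) (2 ^ k) (mirror_len maxdir k) le_rfl
        (by simp [List.length_replicate]; omega)]
      rw [List.take_of_length_le (le_of_eq (mirror_len maxdir k))]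
      simp only [Nat.sub_self, List.take_zero, List.nil_append, List.drop_replicate,
        List.map_reverse, List.append_assoc]
      rw [show (2:Nat) ^ L - 2 ^ k - 2 ^ k = 2 ^ L - 2 ^ k * 2 by omega]

-- ===== Gray-code / popcount theory for B's closed form =====

lemma xor_emod_two (a b : Nat) : (a ^^^ b) % 2 = if a % 2 = b % 2 then 0 else 1 := by
  have h := Nat.testBit_xor a b 0
  simp only [Nat.testBit_zero] at h
  rcases Nat.mod_two_eq_zero_or_one a with ha | ha <;>
    rcases Nat.mod_two_eq_zero_or_one b with hb | hb <;>
    rcases Nat.mod_two_eq_zero_or_one (a ^^^ b) with hx | hx <;>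
    simp [ha, hb, hx] at h ⊢

-- xor against the all-ones mask is subtraction from it
lemma mask_xor (w n : Nat) (hn : n < 2 ^ w) : (2 ^ w - 1) ^^^ n = 2 ^ w - 1 - n := by
  induction w generalizing n with
  | zero => interval_cases n; rfl
  | succ w ih =>
      have hpw : (2:Nat) ^ (w + 1) = 2 * 2 ^ w := by rw [pow_succ]; ring
      have h1 : (1:Nat) ≤ 2 ^ w := Nat.one_le_two_pow
      have hhalf : (2 ^ (w + 1) - 1) / 2 = 2 ^ w - 1 := by omega
      have hn2 : n / 2 < 2 ^ w := by omega
      have hdiv : ((2 ^ (w + 1) - 1) ^^^ n) / 2 = 2 ^ w - 1 - n / 2 := by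
        rw [Nat.xor_div_two, hhalf, ih (n / 2) hn2]
      have hodd : (2 ^ (w + 1) - 1) % 2 = 1 := by omega
      have hmod := xor_emod_two (2 ^ (w + 1) - 1) n
      rw [hodd] at hmod
      have hx := Nat.div_add_mod ((2 ^ (w + 1) - 1) ^^^ n) 2
      rw [hdiv] at hx
      rcases Nat.mod_two_eq_zero_or_one n with hb | hb <;> rw [hb] at hmod
      · have hmod' : ((2 ^ (w + 1) - 1) ^^^ n) % 2 = 1 := by rw [hmod]; rfl
        omega
      · have hmod' : ((2 ^ (w + 1) - 1) ^^^ n) % 2 = 0 := by rw [hmod]; rfl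
        omega

-- adding a fresh top bit via xor
lemma xor_two_pow_add (k g : Nat) (hg : g < 2 ^ k) : 2 ^ k ^^^ g = 2 ^ k + g := by
  induction k generalizing g with
  | zero => interval_cases g; rfl
  | succ k ih =>
      have hpw : (2:Nat) ^ (k + 1) = 2 * 2 ^ k := by rw [pow_succ]; ring
      have hg2 : g / 2 < 2 ^ k := by omega
      have hhalf : (2:Nat) ^ (k + 1) / 2 = 2 ^ k := by omega
      have hdiv : (2 ^ (k + 1) ^^^ g) / 2 = 2 ^ k + g / 2 := by
        rw [Nat.xor_div_two, hhalf, ih _ hg2]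
      have heven : (2 ^ (k + 1)) % 2 = 0 := by omega
      have hmod := xor_emod_two (2 ^ (k + 1)) g
      rw [heven] at hmod
      have hx := Nat.div_add_mod (2 ^ (k + 1) ^^^ g) 2
      rw [hdiv] at hx
      rcases Nat.mod_two_eq_zero_or_one g with hb | hb <;> rw [hb] at hmod
      · have hmod' : (2 ^ (k + 1) ^^^ g) % 2 = 0 := by rw [hmod]; rfl
        omega
      · have hmod' : (2 ^ (k + 1) ^^^ g) % 2 = 1 := by rw [hmod]; rfl
        omega

-- mirroring inside level k+1 adds exactly the top bit to the Gray code
lemma gray_mirror (k n : Nat) (hn : n < 2 ^ k) :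
    (2 ^ (k + 1) - 1 - n) ^^^ ((2 ^ (k + 1) - 1 - n) / 2)
      = (n ^^^ n / 2) + 2 ^ k := by
  have hpw : (2:Nat) ^ (k + 1) = 2 * 2 ^ k := by rw [pow_succ]; ring
  have h1 : (1:Nat) ≤ 2 ^ k := Nat.one_le_two_pow
  have hn' : n < 2 ^ (k + 1) := by omega
  have hM : 2 ^ (k + 1) - 1 - n = (2 ^ (k + 1) - 1) ^^^ n := (mask_xor (k + 1) n hn').symm
  have hmask2 : (2 ^ (k + 1) - 1) / 2 = 2 ^ k - 1 := by omega
  have hG : n ^^^ n / 2 < 2 ^ k :=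
    Nat.xor_lt_two_pow hn (by omega)
  rw [hM, Nat.xor_div_two, hmask2]
  have : ((2 ^ (k + 1) - 1) ^^^ n) ^^^ ((2 ^ k - 1) ^^^ n / 2)
      = ((2 ^ (k + 1) - 1) ^^^ (2 ^ k - 1)) ^^^ (n ^^^ n / 2) := by
    ac_rfl
  rw [this, mask_xor (k + 1) (2 ^ k - 1) (by omega),
      show 2 ^ (k + 1) - 1 - (2 ^ k - 1) = 2 ^ k by omega,
      xor_two_pow_add k _ hG, Nat.add_comm]

-- one-step unfolding of popCount, valid for every n (both sides are 0 at n = 0)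
lemma popCount_step (n : Nat) : popCount n = popCount (n / 2) + n % 2 := by
  by_cases h : n = 0
  · subst h; simp [popCount]
  · rw [popCount]; simp [h]

lemma popCount_two_pow_add (k g : Nat) (hg : g < 2 ^ k) :
    popCount (2 ^ k + g) = popCount g + 1 := by
  induction k generalizing g with
  | zero =>
      interval_cases g
      simp [popCount]
  | succ k ih =>
      have hpw : (2:Nat) ^ (k + 1) = 2 * 2 ^ k := by rw [pow_succ]; ring
      have hg2 : g / 2 < 2 ^ k := by omega
      have hd : (2 ^ (k + 1) + g) / 2 = 2 ^ k + g / 2 := by omega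
      have hm : (2 ^ (k + 1) + g) % 2 = g % 2 := by omega
      rw [popCount_step (2 ^ (k + 1) + g), hd, hm, ih _ hg2, popCount_step g]
      omega

-- the Python modulus m = (maxdir if maxdir > 1 else 1): advancing one step commutes with mod m
lemma mod_advance (maxdir c : Int) :
    (if PySem.Int.mod c (if maxdir > 1 then maxdir else 1) ≥ maxdir - 1 then (0:Int)
     else PySem.Int.mod c (if maxdir > 1 then maxdir else 1) + 1)
    = PySem.Int.mod (c + 1) (if maxdir > 1 then maxdir else 1) := by
  by_cases hm : maxdir > 1
  · simp only [hm, if_pos]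
    rw [PySem.Int.mod_eq_emod_of_pos (by omega), PySem.Int.mod_eq_emod_of_pos (by omega)]
    have hr0 : 0 ≤ c % maxdir := Int.emod_nonneg c (by omega)
    have hr1 : c % maxdir < maxdir := Int.emod_lt_of_pos c (by omega)
    have hone : (1:Int) % maxdir = 1 := Int.emod_eq_of_lt (by omega) (by omega)
    have hadd : (c + 1) % maxdir = (c % maxdir + 1) % maxdir := by
      rw [Int.add_emod, hone]
    rw [hadd]
    by_cases htop : c % maxdir ≥ maxdir - 1
    · have : c % maxdir = maxdir - 1 := by omega
      rw [if_pos htop, this, show maxdir - 1 + 1 = maxdir by ring, Int.emod_self]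
    · rw [if_neg htop,
        Int.emod_eq_of_lt (show (0:Int) ≤ c % maxdir + 1 by omega)
          (show c % maxdir + 1 < maxdir by omega)]
  · simp only [hm, if_false]
    rw [PySem.Int.mod_eq_emod_of_pos (by omega), PySem.Int.mod_eq_emod_of_pos (by omega)]
    simp only [Int.emod_one]
    have : (0:Int) ≥ maxdir - 1 := by omega
    simp [this]

-- the mirror build equals B's closed form
lemma mirror_closed (maxdir : Int) (k : Nat) :
    (List.range k).foldl (fun product _ =>
      product ++ product.reverse.map (fun x => if x ≥ maxdir - 1 then 0 else x + 1))
      ([0] : List Int)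
    = (List.range (2 ^ k)).map (fun n =>
        PySem.Int.mod ((popCount (n ^^^ (n >>> 1)) : Nat) : Int) (if maxdir > 1 then maxdir else 1)) := by
  induction k with
  | zero =>
      have hpc0 : popCount 0 = 0 := by simp [popCount]
      by_cases hm : maxdir > 1 <;>
        · simp only [List.range_zero, List.foldl_nil, pow_zero, List.range_one, List.map_cons,
            List.map_nil, Nat.shiftRight_one, Nat.zero_div, Nat.xor_zero, hpc0,
            Nat.cast_zero]
          rw [show ((if maxdir > 1 then maxdir else 1) : Int) = if maxdir > 1 then maxdir else 1 from rfl]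
          simp only [hm, if_true, if_false]
          rw [PySem.Int.mod_eq_emod_of_pos (by omega)]
          simp
  | succ k ih =>
      rw [List.range_succ, List.foldl_append]
      simp only [List.foldl_cons, List.foldl_nil, ih]
      rw [show (2:Nat) ^ (k + 1) = 2 ^ k + 2 ^ k by rw [pow_succ]; ring, List.range_add,
        List.map_append]
      congr 1
      apply List.ext_getElem
      · simp
      · intro i h1 h2
        simp only [List.getElem_map, List.getElem_reverse, List.length_map,
          List.length_range, List.getElem_range]
        have hi : i < 2 ^ k := by simpa using h2
        have hn : 2 ^ k - 1 - i < 2 ^ k := by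
          have := Nat.one_le_two_pow (n := k)
          omega
        have hmirror := gray_mirror k (2 ^ k - 1 - i) hn
        have hidx : 2 ^ (k + 1) - 1 - (2 ^ k - 1 - i) = 2 ^ k + i := by
          have hpw : (2:Nat) ^ (k + 1) = 2 * 2 ^ k := by rw [pow_succ]; ring
          have := Nat.one_le_two_pow (n := k)
          omega
        rw [hidx] at hmirror
        have hG : (2 ^ k - 1 - i) ^^^ (2 ^ k - 1 - i) / 2 < 2 ^ k :=
          Nat.xor_lt_two_pow hn (by omega)
        have hpc : popCount ((2 ^ k + i) ^^^ (2 ^ k + i) / 2)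
            = popCount ((2 ^ k - 1 - i) ^^^ (2 ^ k - 1 - i) / 2) + 1 := by
          rw [hmirror, Nat.add_comm, popCount_two_pow_add k _ hG]
        simp only [Nat.shiftRight_one]
        rw [hpc]
        rw [mod_advance maxdir _]
        push_cast
        rfl

-- ===== VERDICT (by name: the statement is the Claim_ definition above) =====
theorem dragon_spec : Claim_equal_dragon := by
  intro level maxdir _ hpre
  unfold Spec_dragon dragon dragon_alt
  have hA := dragon_invariant maxdir level.toNat level.toNat le_rfl
  have hB := mirror_closed maxdir level.toNat
  simp only [Nat.sub_self, List.replicate_zero, List.append_nil] at hA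
  rw [hA, hB]
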